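-- pv_equiv track=rewrite | github.com/eusef/wwvb-decoder | tests/generate_test_data.py | generate_wwvb_frame_bits
-- ===== SOURCE A (Python) =====
-- def generate_wwvb_frame_bits(
--     year: int = 26, day: int = 64, hour: int = 3, minute: int = 18
-- ) -> list[str]:
--     """Generate the 60 symbols for a WWVB frame.
--
--     Uses the same logic as test_frame._make_test_frame.
--     """
--     bits = ["0"] * 60
--
--     # Markers
--     for pos in [0, 9, 19, 29, 39, 49]:
--         bits[pos] = "M"
--
--     # Minutes
--     min_tens = minute // 10
--     bits[1] = "1" if min_tens >= 4 else "0"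
--     rem = min_tens % 4 if min_tens >= 4 else min_tens
--     bits[2] = "1" if rem >= 2 else "0"
--     bits[3] = "1" if (rem % 2) >= 1 else "0"
--
--     min_units = minute % 10
--     bits[5] = "1" if min_units & 8 else "0"
--     bits[6] = "1" if min_units & 4 else "0"
--     bits[7] = "1" if min_units & 2 else "0"
--     bits[8] = "1" if min_units & 1 else "0"
--
--     # Hours
--     hr_tens = hour // 10
--     bits[12] = "1" if hr_tens >= 2 else "0"
--     bits[13] = "1" if (hr_tens % 2) >= 1 else "0"
--
--     hr_units = hour % 10
--     bits[15] = "1" if hr_units & 8 else "0"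
--     bits[16] = "1" if hr_units & 4 else "0"
--     bits[17] = "1" if hr_units & 2 else "0"
--     bits[18] = "1" if hr_units & 1 else "0"
--
--     # Day of year
--     day_h = day // 100
--     bits[22] = "1" if day_h >= 2 else "0"
--     bits[23] = "1" if (day_h % 2) >= 1 else "0"
--
--     day_t = (day % 100) // 10
--     bits[24] = "1" if day_t & 8 else "0"
--     bits[25] = "1" if day_t & 4 else "0"
--     bits[26] = "1" if day_t & 2 else "0"
--     bits[27] = "1" if day_t & 1 else "0"
--
--     day_u = day % 10
--     bits[30] = "1" if day_u & 8 else "0"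
--     bits[31] = "1" if day_u & 4 else "0"
--     bits[32] = "1" if day_u & 2 else "0"
--     bits[33] = "1" if day_u & 1 else "0"
--
--     # DUT1 positive, value 2 (0.2s)
--     bits[36] = "1"
--     bits[38] = "1"
--     bits[42] = "1"  # weight 2
--
--     # Year
--     yr_tens = year // 10
--     bits[45] = "1" if yr_tens & 8 else "0"
--     bits[46] = "1" if yr_tens & 4 else "0"
--     bits[47] = "1" if yr_tens & 2 else "0"
--     bits[48] = "1" if yr_tens & 1 else "0"
--
--     yr_units = year % 10
--     bits[50] = "1" if yr_units & 8 else "0"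
--     bits[51] = "1" if yr_units & 4 else "0"
--     bits[52] = "1" if yr_units & 2 else "0"
--     bits[53] = "1" if yr_units & 1 else "0"
--
--     # DST on
--     bits[57] = "1"
--     bits[58] = "1"
--
--     # Position 59 is the P0 marker (also next frame's reference)
--     # Critical for sync: two consecutive markers at :59 and :00
--     bits[59] = "M"
--
--     return bits
-- ===== SOURCE B (Python) =====
-- def generate_wwvb_frame_bits(
--     year: int = 26, day: int = 64, hour: int = 3, minute: int = 18
-- ) -> list[str]:
--     """Render each of the 60 positions from precomputed marker/one position lists."""
--     mt = minute // 10
--     rem = mt % 4 if mt >= 4 else mt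
--     bcd = [(minute % 10, 5), (hour % 10, 15), (day % 100 // 10, 24),
--            (day % 10, 30), (year // 10, 45), (year % 10, 50)]
--     sat = [(rem, 2), (hour // 10, 12), (day // 100, 22)]
--     ones = [36, 38, 42, 57, 58]
--     if mt >= 4:
--         ones.append(1)
--     for v, s in bcd:
--         ones += [s + i for i, w in enumerate((8, 4, 2, 1)) if v & w]
--     for v, p in sat:
--         if v >= 2:
--             ones.append(p)
--         if v % 2 >= 1:
--             ones.append(p + 1)
--     markers = [0, 9, 19, 29, 39, 49, 59]
--     return ["M" if i in markers else "1" if i in ones else "0" for i in range(60)]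
-- ===== Notes on version B (the rewrite author's own statement) =====
-- stated objective: alternative
-- what changed: B first computes the list of positions that carry a '1' (fixed positions plus data-driven BCD/tens field tables) and the marker positions, then renders the frame position by position over range(60) with membership tests, instead of A's sequence of in-place assignments into a preallocated 60-slot list.
import Mathlib
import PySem

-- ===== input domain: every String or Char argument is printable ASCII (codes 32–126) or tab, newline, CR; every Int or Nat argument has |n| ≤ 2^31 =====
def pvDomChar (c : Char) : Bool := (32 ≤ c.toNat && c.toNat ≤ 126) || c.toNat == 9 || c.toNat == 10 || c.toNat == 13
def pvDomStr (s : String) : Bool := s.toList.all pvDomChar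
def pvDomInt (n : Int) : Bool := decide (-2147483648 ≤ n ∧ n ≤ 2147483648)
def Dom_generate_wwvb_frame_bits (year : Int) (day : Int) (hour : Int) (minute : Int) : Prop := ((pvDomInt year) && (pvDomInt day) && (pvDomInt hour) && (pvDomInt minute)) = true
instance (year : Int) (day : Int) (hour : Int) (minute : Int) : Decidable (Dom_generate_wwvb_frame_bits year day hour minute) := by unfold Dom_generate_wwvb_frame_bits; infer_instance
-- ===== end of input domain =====

-- B first computes the LIST OF POSITIONS carrying '1' (from field tables) and the marker
-- positions, then renders the 60 symbols by membership tests over range(60), instead of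
-- mutating a preallocated 60-slot list field by field (objective: alternative decomposition).

-- ===== PORT A =====
-- literal transliteration of A: allocate 60 "0"s, set markers in a loop, then assign
-- each position in place (List.set), in A's exact order, with A's exact conditions.
def generate_wwvb_frame_bits (year : Int) (day : Int) (hour : Int) (minute : Int) : List String :=
  let bits := List.replicate 60 "0"
  let bits := [0, 9, 19, 29, 39, 49].foldl (fun (b : List String) (pos : Nat) => b.set pos "M") bits
  let min_tens := PySem.Int.floordiv minute 10
  let bits := bits.set 1 (if min_tens ≥ 4 then "1" else "0")
  let rem := if min_tens ≥ 4 then PySem.Int.mod min_tens 4 else min_tens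
  let bits := bits.set 2 (if rem ≥ 2 then "1" else "0")
  let bits := bits.set 3 (if PySem.Int.mod rem 2 ≥ 1 then "1" else "0")
  let min_units := PySem.Int.mod minute 10
  let bits := bits.set 5 (if PySem.Int.band min_units 8 ≠ 0 then "1" else "0")
  let bits := bits.set 6 (if PySem.Int.band min_units 4 ≠ 0 then "1" else "0")
  let bits := bits.set 7 (if PySem.Int.band min_units 2 ≠ 0 then "1" else "0")
  let bits := bits.set 8 (if PySem.Int.band min_units 1 ≠ 0 then "1" else "0")
  let hr_tens := PySem.Int.floordiv hour 10
  let bits := bits.set 12 (if hr_tens ≥ 2 then "1" else "0")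
  let bits := bits.set 13 (if PySem.Int.mod hr_tens 2 ≥ 1 then "1" else "0")
  let hr_units := PySem.Int.mod hour 10
  let bits := bits.set 15 (if PySem.Int.band hr_units 8 ≠ 0 then "1" else "0")
  let bits := bits.set 16 (if PySem.Int.band hr_units 4 ≠ 0 then "1" else "0")
  let bits := bits.set 17 (if PySem.Int.band hr_units 2 ≠ 0 then "1" else "0")
  let bits := bits.set 18 (if PySem.Int.band hr_units 1 ≠ 0 then "1" else "0")
  let day_h := PySem.Int.floordiv day 100
  let bits := bits.set 22 (if day_h ≥ 2 then "1" else "0")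
  let bits := bits.set 23 (if PySem.Int.mod day_h 2 ≥ 1 then "1" else "0")
  let day_t := PySem.Int.floordiv (PySem.Int.mod day 100) 10
  let bits := bits.set 24 (if PySem.Int.band day_t 8 ≠ 0 then "1" else "0")
  let bits := bits.set 25 (if PySem.Int.band day_t 4 ≠ 0 then "1" else "0")
  let bits := bits.set 26 (if PySem.Int.band day_t 2 ≠ 0 then "1" else "0")
  let bits := bits.set 27 (if PySem.Int.band day_t 1 ≠ 0 then "1" else "0")
  let day_u := PySem.Int.mod day 10
  let bits := bits.set 30 (if PySem.Int.band day_u 8 ≠ 0 then "1" else "0")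
  let bits := bits.set 31 (if PySem.Int.band day_u 4 ≠ 0 then "1" else "0")
  let bits := bits.set 32 (if PySem.Int.band day_u 2 ≠ 0 then "1" else "0")
  let bits := bits.set 33 (if PySem.Int.band day_u 1 ≠ 0 then "1" else "0")
  let bits := bits.set 36 "1"
  let bits := bits.set 38 "1"
  let bits := bits.set 42 "1"
  let yr_tens := PySem.Int.floordiv year 10
  let bits := bits.set 45 (if PySem.Int.band yr_tens 8 ≠ 0 then "1" else "0")
  let bits := bits.set 46 (if PySem.Int.band yr_tens 4 ≠ 0 then "1" else "0")
  let bits := bits.set 47 (if PySem.Int.band yr_tens 2 ≠ 0 then "1" else "0")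
  let bits := bits.set 48 (if PySem.Int.band yr_tens 1 ≠ 0 then "1" else "0")
  let yr_units := PySem.Int.mod year 10
  let bits := bits.set 50 (if PySem.Int.band yr_units 8 ≠ 0 then "1" else "0")
  let bits := bits.set 51 (if PySem.Int.band yr_units 4 ≠ 0 then "1" else "0")
  let bits := bits.set 52 (if PySem.Int.band yr_units 2 ≠ 0 then "1" else "0")
  let bits := bits.set 53 (if PySem.Int.band yr_units 1 ≠ 0 then "1" else "0")
  let bits := bits.set 57 "1"
  let bits := bits.set 58 "1"
  let bits := bits.set 59 "M"
  bits

-- ===== PORT B =====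
-- transliteration of Source B: collect the positions that carry '1' (fixed positions, the
-- BCD fields via an enumerate over the weights, the two-bit tens fields), then render
-- position by position over range(60) with membership tests.
def generate_wwvb_frame_bits_alt (year : Int) (day : Int) (hour : Int) (minute : Int) : List String :=
  let mt := PySem.Int.floordiv minute 10
  let rem := if mt ≥ 4 then PySem.Int.mod mt 4 else mt
  let bcd : List (Int × Int) :=
    [(PySem.Int.mod minute 10, 5), (PySem.Int.mod hour 10, 15),
     (PySem.Int.floordiv (PySem.Int.mod day 100) 10, 24), (PySem.Int.mod day 10, 30),
     (PySem.Int.floordiv year 10, 45), (PySem.Int.mod year 10, 50)]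
  let sat : List (Int × Int) := [(rem, 2), (PySem.Int.floordiv hour 10, 12), (PySem.Int.floordiv day 100, 22)]
  let ones : List Int :=
    (([36, 38, 42, 57, 58] ++ (if mt ≥ 4 then [1] else []))
      ++ bcd.flatMap (fun p =>
          (PySem.List.enumerate [(8 : Int), 4, 2, 1]).flatMap (fun q =>
            if PySem.Int.band p.1 q.2 ≠ 0 then [p.2 + q.1] else [])))
      ++ sat.flatMap (fun p =>
          (if p.1 ≥ 2 then [p.2] else []) ++ (if PySem.Int.mod p.1 2 ≥ 1 then [p.2 + 1] else []))
  let markers : List Int := [0, 9, 19, 29, 39, 49, 59]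
  (PySem.List.pyRange 0 60 1).map (fun i =>
    if i ∈ markers then "M" else if i ∈ ones then "1" else "0")

-- ===== PRECONDITION & SPEC =====
def Spec_generate_wwvb_frame_bits (year : Int) (day : Int) (hour : Int) (minute : Int) (out : List String) : Prop := out = generate_wwvb_frame_bits_alt year day hour minute
instance (year : Int) (day : Int) (hour : Int) (minute : Int) (out : List String) : Decidable (Spec_generate_wwvb_frame_bits year day hour minute out) := by unfold Spec_generate_wwvb_frame_bits; infer_instance

-- ===== CLAIM =====
def Claim_equal_generate_wwvb_frame_bits : Prop := ∀ (year : Int) (day : Int) (hour : Int) (minute : Int), Dom_generate_wwvb_frame_bits year day hour minute → Spec_generate_wwvb_frame_bits year day hour minute (generate_wwvb_frame_bits year day hour minute)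

-- ===== VERDICT =====
theorem generate_wwvb_frame_bits_spec : Claim_equal_generate_wwvb_frame_bits := by
  intro year day hour minute _
  unfold Spec_generate_wwvb_frame_bits generate_wwvb_frame_bits generate_wwvb_frame_bits_alt
  simp [PySem.List.pyRange_one, List.range_succ, PySem.List.enumerate, List.flatMap,
    List.foldl, List.set, List.replicate]
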